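-- pv_equiv track=rewrite | github.com/EmilioGalimberti/finalAED | practico/FINAL/tipofinal3/Principal.py | procesamiento
-- ===== SOURCE A (Python) =====
-- def procesamiento(texto):
--     texto = texto.lower()
--     clet = 0
--     cont_palabras = 0
--     contador_numeros = 0
--     comienza_vocal = False
--     contiene_t = False
--
--     if texto[-1] != ".":
--         texto = texto + "."
--
--     for car in texto:
--
--         if car != " " and car != ".":
--             clet += 1
--             if car in "0123456789":
--                 contador_numeros += 1
--             if clet == 1 and car in "aeiouáéíóúü":
--                 comienza_vocal = True
--             if clet < 4 and car == "t":
--                 contiene_t = True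
--
--         else:
--             if (clet % 2) == 0 and comienza_vocal and contiene_t:
--                 cont_palabras += 1
--             clet = 0
--             contador_numeros = 0
--             comienza_vocal = False
--             contiene_t = False
--
--     return cont_palabras
-- ===== SOURCE B (Python) =====
-- def procesamiento(texto):
--     texto = texto.lower()
--     cont_palabras = 0
--     for palabra in texto.replace(".", " ").split(" "):
--         if palabra and len(palabra) % 2 == 0 and palabra[0] in "aeiouáéíóúü" and "t" in palabra[:3]:
--             cont_palabras += 1
--     return cont_palabras
-- ===== Notes on version B (the rewrite author's own statement) =====
-- stated objective: faster
-- what changed: Instead of a character-by-character state machine with incremental counters/flags, B tokenizes the text once (replace '.' by ' ' and split on ' ', both C-level str methods, removing the per-character interpreted loop) and counts the tokens that are non-empty, of even length, start with a vowel and contain 't' in their first three characters; the unused digit counter is dropped.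
import Mathlib
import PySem

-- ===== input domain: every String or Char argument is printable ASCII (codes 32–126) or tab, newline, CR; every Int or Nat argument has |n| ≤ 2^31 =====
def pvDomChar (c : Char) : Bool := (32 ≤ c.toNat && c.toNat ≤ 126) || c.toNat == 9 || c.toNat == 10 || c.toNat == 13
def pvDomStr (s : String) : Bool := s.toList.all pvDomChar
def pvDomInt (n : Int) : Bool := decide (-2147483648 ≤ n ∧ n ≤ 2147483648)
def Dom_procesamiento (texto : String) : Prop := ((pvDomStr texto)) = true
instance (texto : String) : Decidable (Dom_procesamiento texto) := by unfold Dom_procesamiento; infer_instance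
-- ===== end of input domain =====

-- B replaces A's character-level state machine by a tokenize-and-count pass (split on ' ' and '.'), same return value; objective: simpler.

-- ===== PORT A =====
-- the body of A's `for car in texto` loop, on the state (clet, cont_palabras, contador_numeros, comienza_vocal, contiene_t)
def stepA (st : Int × Int × Int × Bool × Bool) (car : Char) : Int × Int × Int × Bool × Bool :=
  let (clet, cont, cnum, voc, ct) := st
  if car ≠ ' ' ∧ car ≠ '.' then
    let clet := clet + 1
    let cnum := if ("0123456789".toList).contains car then cnum + 1 else cnum
    let voc := if clet = 1 ∧ ("aeiouáéíóúü".toList).contains car then true else voc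
    let ct := if clet < 4 ∧ car = 't' then true else ct
    (clet, cont, cnum, voc, ct)
  else
    let cont := if clet % 2 = 0 ∧ voc ∧ ct then cont + 1 else cont
    (0, cont, 0, false, false)

def procesamiento (texto : String) : Int :=
  let texto := PySem.Str.lower texto
  match PySem.Str.pyGet? texto (-1) with
  | none => 0  -- texto[-1] raises IndexError on empty input (excluded by Pre_)
  | some last =>
    let texto := if last ≠ '.' then texto ++ "." else texto
    (texto.toList.foldl stepA (0, 0, 0, false, false)).2.1

-- ===== PORT B =====
def procesamiento_alt (texto : String) : Int :=
  let texto := PySem.Str.lower texto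
  let palabras := PySem.Chars.splitOn (PySem.Str.replace texto "." " ").toList (" ".toList)
  palabras.foldl (fun cont palabra =>
    if palabra ≠ [] ∧ (palabra.length : Int) % 2 = 0 ∧
        ("aeiouáéíóúü".toList).contains (palabra.headD ' ') ∧
        PySem.Chars.isIn ("t".toList) (PySem.List.slice palabra none (some 3)) then
      cont + 1
    else cont) 0

-- ===== PRECONDITION & SPEC =====
-- Pre_ excludes exactly the empty string, on which A raises IndexError at texto[-1] (B returns 0 there).
def Pre_procesamiento (texto : String) : Prop := texto ≠ ""
instance (texto : String) : Decidable (Pre_procesamiento texto) := by unfold Pre_procesamiento; infer_instance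
def pvWitness_procesamiento : String := "auto text."

def Spec_procesamiento (texto : String) (out : Int) : Prop := out = procesamiento_alt texto
instance (texto : String) (out : Int) : Decidable (Spec_procesamiento texto out) := by unfold Spec_procesamiento; infer_instance

-- ===== CLAIM (what is proved, stated in full; the proofs are below) =====
def Claim_equal_procesamiento : Prop := ∀ (texto : String), Dom_procesamiento texto → Pre_procesamiento texto → Spec_procesamiento texto (procesamiento texto)

-- ===== LEMMAS AND PROOFS =====

-- separator characters (space and period)
def pvSep (c : Char) : Bool := c == ' ' || c == '.'
-- '.' → ' ' (what texto.replace(".", " ") does per character)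
def pvMap (c : Char) : Char := if c = '.' then ' ' else c
-- the word-qualifies test, on a token
def pvVocB (w : List Char) : Bool :=
  match w with | [] => false | c :: _ => ("aeiouáéíóúü".toList).contains c
def pvTB (w : List Char) : Bool := (w.take 3).contains 't'
def pvDigs (p : List Char) : Int := ((p.filter (fun c => ("0123456789".toList).contains c)).length : Int)
def pvOk (w : List Char) : Bool :=
  decide ((w.length : Int) % 2 = 0) && pvVocB w && pvTB w
-- split l on pvSep, given the pending (separator-free) prefix p; all tokens, including the final one
def pvTokens (p : List Char) : List Char → List (List Char)
  | [] => [p]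
  | c :: l => if pvSep c then p :: pvTokens [] l else pvTokens (p ++ [c]) l
-- number of FLUSHED qualifying tokens (a token is flushed when a separator follows it)
def pvCnt (p : List Char) : List Char → Int
  | [] => 0
  | c :: l => if pvSep c then (if pvOk p then 1 else 0) + pvCnt [] l else pvCnt (p ++ [c]) l
-- the trailing, unflushed token
def pvLast (p : List Char) : List Char → List Char
  | [] => p
  | c :: l => if pvSep c then pvLast [] l else pvLast (p ++ [c]) l
-- qualifying tokens in a token list
def pvSum : List (List Char) → Int
  | [] => 0
  | w :: ws => (if pvOk w then 1 else 0) + pvSum ws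
-- A's loop state as a function of the current separator-free prefix p and the count so far
def pvSt (p : List Char) (n : Int) : Int × Int × Int × Bool × Bool :=
  ((p.length : Int), n, pvDigs p, pvVocB p, pvTB p)

lemma stepA_sep (p : List Char) (n : Int) (c : Char) (h : pvSep c = true) :
    stepA (pvSt p n) c = pvSt [] (n + if pvOk p then 1 else 0) := by
  have hc : ¬ (c ≠ ' ' ∧ c ≠ '.') := by
    simp only [pvSep, Bool.or_eq_true, beq_iff_eq] at h
    tauto
  simp only [stepA, pvSt, if_neg hc]
  have : (if (p.length : Int) % 2 = 0 ∧ pvVocB p = true ∧ pvTB p = true then n + 1 else n)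
      = n + if pvOk p then 1 else 0 := by
    simp only [pvOk, Bool.and_eq_true, decide_eq_true_eq]
    split_ifs <;> simp_all
  rw [this]
  simp [pvVocB, pvTB, pvDigs]

lemma stepA_word (p : List Char) (n : Int) (c : Char) (h : pvSep c = false) :
    stepA (pvSt p n) c = pvSt (p ++ [c]) n := by
  have hc1 : c ≠ ' ' := by intro h'; subst h'; simp [pvSep] at h
  have hc2 : c ≠ '.' := by intro h'; subst h'; simp [pvSep] at h
  simp only [stepA, pvSt, if_pos (And.intro hc1 hc2)]
  refine congrArg₂ _ (by push_cast; simp) (congrArg₂ _ rfl (congrArg₂ _ ?_ (congrArg₂ _ ?_ ?_)))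
  · -- contador_numeros
    by_cases hd : ("0123456789".toList).contains c = true
    · have hone : List.filter (fun x => ("0123456789".toList).contains x) [c] = [c] := by
        rw [List.filter_cons, List.filter_nil, if_pos hd]
      rw [if_pos hd]
      simp only [pvDigs, List.filter_append, hone, List.length_append, List.length_singleton]
      push_cast
      ring
    · have hnone : List.filter (fun x => ("0123456789".toList).contains x) [c] = [] := by
        rw [List.filter_cons, List.filter_nil, if_neg hd]
      rw [if_neg hd]
      simp only [pvDigs, List.filter_append, hnone, List.append_nil]
  · -- comienza_vocal
    cases p with
    | nil =>
      by_cases hv : ("aeiouáéíóúü".toList).contains c = true <;> simp [pvVocB]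
    | cons a t =>
      rw [if_neg]
      · simp [pvVocB]
      · rintro ⟨h1, -⟩
        simp only [List.length_cons] at h1
        push_cast at h1
        omega
  · -- contiene_t
    by_cases hlen : p.length ≤ 2
    · have htake : (p ++ [c]).take 3 = p ++ [c] :=
        List.take_of_length_le (by simp; omega)
      have hcond : ((p.length : Int)) + 1 < 4 := by push_cast; omega
      by_cases hct : c = 't'
      · rw [if_pos ⟨hcond, hct⟩]
        subst hct
        simp [pvTB, htake]
      · rw [if_neg (fun hh => hct hh.2)]
        have htp : List.take 3 p = p := List.take_of_length_le (by omega)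
        simp [pvTB, htake, htp, Ne.symm hct]
    · have htake : (p ++ [c]).take 3 = p.take 3 :=
        List.take_append_of_le_length (by omega)
      have hcond : ¬ (((p.length : Int)) + 1 < 4) := by push_cast; omega
      rw [if_neg (fun hh => hcond hh.1)]
      simp [pvTB, htake]

lemma loopA (l : List Char) : ∀ (p : List Char) (n : Int),
    l.foldl stepA (pvSt p n) = pvSt (pvLast p l) (n + pvCnt p l) := by
  induction l with
  | nil => intro p n; simp [pvLast, pvCnt]
  | cons c l ih =>
    intro p n
    by_cases hs : pvSep c = true
    · rw [List.foldl_cons, stepA_sep p n c hs, ih]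
      simp only [pvLast, pvCnt, if_pos hs]
      ring_nf
    · have hs' : pvSep c = false := by simpa using hs
      rw [List.foldl_cons, stepA_word p n c hs', ih]
      simp only [pvLast, pvCnt, hs']
      simp

lemma tokens_append_dot (l : List Char) : ∀ p, pvTokens p (l ++ ['.']) = pvTokens p l ++ [[]] := by
  induction l with
  | nil => intro p; simp [pvTokens, pvSep]
  | cons c l ih =>
    intro p
    by_cases hs : pvSep c = true <;> simp [pvTokens, hs, ih]

lemma cnt_append_dot (l : List Char) : ∀ p, pvCnt p (l ++ ['.']) = pvSum (pvTokens p l) := by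
  induction l with
  | nil => intro p; simp [pvCnt, pvTokens, pvSum, pvSep]
  | cons c l ih =>
    intro p
    by_cases hs : pvSep c = true <;> simp [pvCnt, pvTokens, pvSum, hs, ih]

lemma sum_append_nil (ts : List (List Char)) : pvSum (ts ++ [[]]) = pvSum ts := by
  induction ts with
  | nil => simp [pvSum, pvOk, pvVocB]
  | cons w ws ih => simp [pvSum, ih]

lemma replace_go_map (l : List Char) : ∀ (acc : List Char) (fuel : Nat), l.length ≤ fuel →
    PySem.Chars.replace.go ['.'] [' '] fuel l acc = acc.reverse ++ l.map pvMap := by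
  induction l with
  | nil =>
    intro acc fuel _
    rw [PySem.Chars.replace.go.eq_def]
    cases fuel <;> simp
  | cons c t ih =>
    intro acc fuel hf
    cases fuel with
    | zero => simp at hf
    | succ fuel =>
      rw [PySem.Chars.replace.go.eq_def]
      dsimp only
      by_cases hc : c = '.'
      · subst hc
        rw [if_pos (by simp [List.isPrefixOf])]
        have hd : List.drop (['.'].length) ('.' :: t) = t := by simp
        rw [hd, ih _ fuel (by simpa using hf)]
        simp [pvMap]
      · rw [if_neg (by simp [List.isPrefixOf]; exact fun h => hc h.symm)]
        rw [ih _ fuel (by simpa using hf)]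
        simp [pvMap, hc]

lemma replace_map (l : List Char) : PySem.Chars.replace l ['.'] [' '] = l.map pvMap := by
  rw [PySem.Chars.replace]
  rw [if_neg (by simp)]
  rw [replace_go_map l [] l.length le_rfl]
  simp

lemma split_go_map (l : List Char) : ∀ (cur : List Char) (acc : List (List Char)) (fuel : Nat), l.length < fuel →
    PySem.Chars.splitOn.go [' '] fuel (l.map pvMap) cur acc = acc.reverse ++ pvTokens cur.reverse l := by
  induction l with
  | nil =>
    intro cur acc fuel hf
    cases fuel with
    | zero => omega
    | succ fuel =>
      rw [PySem.Chars.splitOn.go.eq_def]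
      simp [pvTokens]
  | cons c t ih =>
    intro cur acc fuel hf
    cases fuel with
    | zero => omega
    | succ fuel =>
      rw [PySem.Chars.splitOn.go.eq_def]
      simp only [List.map_cons]
      by_cases hs : pvSep c = true
      · have hmap : pvMap c = ' ' := by
          simp only [pvSep, Bool.or_eq_true, beq_iff_eq] at hs
          rcases hs with h | h <;> simp [pvMap, h]
        rw [hmap]
        rw [if_pos (by simp [List.isPrefixOf])]
        have hd : List.drop ([' '].length) (' ' :: List.map pvMap t) = List.map pvMap t := by simp
        rw [hd, ih [] (cur.reverse :: acc) fuel (by simpa using hf)]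
        simp [pvTokens, hs]
      · have hs1 : c ≠ ' ' := by intro h'; subst h'; simp [pvSep] at hs
        have hs2 : c ≠ '.' := by intro h'; subst h'; simp [pvSep] at hs
        have hsf : pvSep c = false := by simpa using hs
        have hmap : pvMap c = c := by simp [pvMap, hs2]
        rw [hmap]
        rw [if_neg (by simp [List.isPrefixOf]; exact fun h => hs1 h.symm)]
        rw [ih (c :: cur) acc fuel (by simpa using hf)]
        simp [pvTokens, hsf]

lemma splitOn_map (l : List Char) :
    PySem.Chars.splitOn (l.map pvMap) [' '] = pvTokens [] l := by
  rw [PySem.Chars.splitOn]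
  rw [split_go_map l [] [] ((l.map pvMap).length + 1) (by simp)]
  simp

lemma isIn_t (w : List Char) : PySem.Chars.isIn ['t'] w = w.contains 't' := by
  by_cases h : 't' ∈ w
  · obtain ⟨s1, s2, rfl⟩ := List.append_of_mem h
    rw [(PySem.Chars.isIn_iff_infix _ _).2 ⟨s1, s2, by simp⟩]
    simp
  · have h1 : PySem.Chars.isIn ['t'] w = false := by
      cases hi : PySem.Chars.isIn ['t'] w
      · rfl
      · exact absurd (((PySem.Chars.isIn_iff_infix _ _).1 hi).sublist.subset (by simp)) h
    have h2 : w.contains 't' = false := by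
      cases hcw : w.contains 't'
      · rfl
      · exact absurd (by simpa using hcw) h
    rw [h1, h2]

lemma sumB (ts : List (List Char)) : ∀ (n : Int),
    ts.foldl (fun cont palabra =>
      if palabra ≠ [] ∧ (palabra.length : Int) % 2 = 0 ∧
          ("aeiouáéíóúü".toList).contains (palabra.headD ' ') ∧
          PySem.Chars.isIn ("t".toList) (PySem.List.slice palabra none (some 3)) then
        cont + 1
      else cont) n = n + pvSum ts := by
  induction ts with
  | nil => intro n; simp [pvSum]
  | cons w ws ih =>
    intro n
    have htok : "t".toList = ['t'] := rfl
    have hslice : PySem.List.slice w none (some 3) = w.take 3 := by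
      rw [show ((3:Int)) = ((3:Nat):Int) by norm_num, PySem.List.slice_to_natCast]
    simp only [List.foldl_cons]
    rw [ih]
    simp only [htok, hslice, isIn_t, pvSum]
    rcases w with _ | ⟨a, t⟩
    · rw [if_neg (by simp)]
      have : pvOk [] = false := by simp [pvOk, pvVocB]
      rw [this]
      simp
    · by_cases hok : pvOk (a :: t) = true
      · have hok' := hok
        simp only [pvOk, pvVocB, pvTB, Bool.and_eq_true, decide_eq_true_eq] at hok'
        rw [if_pos ⟨List.cons_ne_nil a t, hok'.1.1, by simpa using hok'.1.2, hok'.2⟩, if_pos hok]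
        ring
      · rw [if_neg, if_neg hok]
        · ring
        · intro hcon
          apply hok
          simp only [pvOk, pvVocB, pvTB, Bool.and_eq_true, decide_eq_true_eq]
          exact ⟨⟨hcon.2.1, by simpa using hcon.2.2.1⟩, hcon.2.2.2⟩

lemma alt_eq_sum (texto : String) :
    procesamiento_alt texto = pvSum (pvTokens [] (PySem.Str.lower texto).toList) := by
  simp only [procesamiento_alt]
  rw [PySem.Str.toList_replace]
  rw [show ".".toList = ['.'] from rfl, show " ".toList = [' '] from rfl]
  rw [replace_map, splitOn_map, sumB]
  simp

-- ===== VERDICT (by name: the statement is the Claim_ definition above) =====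
theorem procesamiento_spec : Claim_equal_procesamiento := by
  intro texto _ hpre
  unfold Spec_procesamiento
  rw [alt_eq_sum]
  have hLne : (PySem.Str.lower texto).toList ≠ [] := by
    rw [PySem.Str.toList_lower]
    simp only [PySem.Chars.lower, ne_eq, List.map_eq_nil_iff]
    intro hnil
    exact hpre (by simp_all)
  have hget : PySem.Str.pyGet? (PySem.Str.lower texto) (-1)
      = some ((PySem.Str.lower texto).toList.getLast hLne) := by
    simp only [PySem.Str.pyGet?_eq, PySem.Chars.pyGet?_eq_listPyGet?]
    rw [PySem.List.pyGet?_neg_one, List.getLast?_eq_some_getLast hLne]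
  have h0 : ((0:Int), (0:Int), (0:Int), false, false) = pvSt [] 0 := rfl
  simp only [procesamiento]
  rw [hget]
  dsimp only
  by_cases hlast : (PySem.Str.lower texto).toList.getLast hLne = '.'
  · rw [if_neg (fun hne => hne hlast)]
    have hL : (PySem.Str.lower texto).toList
        = (PySem.Str.lower texto).toList.dropLast ++ ['.'] := by
      rw [← hlast]
      exact (List.dropLast_append_getLast hLne).symm
    rw [h0, hL, loopA]
    simp only [pvSt]
    rw [cnt_append_dot, tokens_append_dot, sum_append_nil]
    simp
  · rw [if_pos hlast]
    have happ : (PySem.Str.lower texto ++ ".").toList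
        = (PySem.Str.lower texto).toList ++ ['.'] := by simp
    rw [happ, h0, loopA]
    simp only [pvSt]
    rw [cnt_append_dot]
    simp
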